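-- pv_equiv track=rewrite | github.com/brainwhat/CDMA | cdma.py | sum_signals
-- ===== SOURCE A (Python) =====
-- from typing import List, Dict, Optional
--
-- def sum_signals(signals: List[List[int]]) -> List[int]:
--     """Суммировать несколько spread‑сигналов поэлементно
--
--     Все входные сигналы должны иметь одинаковую длину. Пустой вход → пустой результат.
--     """
--     if not signals:
--         return []
--     length = len(signals[0])
--     for s in signals[1:]:
--         if len(s) != length:
--             raise ValueError("All signals must have the same length for summation")
--     return [sum(values) for values in zip(*signals)]
-- ===== SOURCE B (Python) =====
-- def sum_signals(signals):
--     """Element-wise sum of equal-length signals, by row-major accumulation."""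
--     if not signals:
--         return []
--     length = len(signals[0])
--     for s in signals[1:]:
--         if len(s) != length:
--             raise ValueError("All signals must have the same length for summation")
--     total = [0] * length
--     for s in signals:
--         for i in range(length):
--             total[i] += s[i]
--     return total
-- ===== Notes on version B (the rewrite author's own statement) =====
-- stated objective: alternative
-- what changed: B replaces A's column-major transpose-and-sum (zip(*signals) then sum each column) by a row-major pass that maintains a running-sum accumulator list and adds each signal into it in place.
import Mathlib
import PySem

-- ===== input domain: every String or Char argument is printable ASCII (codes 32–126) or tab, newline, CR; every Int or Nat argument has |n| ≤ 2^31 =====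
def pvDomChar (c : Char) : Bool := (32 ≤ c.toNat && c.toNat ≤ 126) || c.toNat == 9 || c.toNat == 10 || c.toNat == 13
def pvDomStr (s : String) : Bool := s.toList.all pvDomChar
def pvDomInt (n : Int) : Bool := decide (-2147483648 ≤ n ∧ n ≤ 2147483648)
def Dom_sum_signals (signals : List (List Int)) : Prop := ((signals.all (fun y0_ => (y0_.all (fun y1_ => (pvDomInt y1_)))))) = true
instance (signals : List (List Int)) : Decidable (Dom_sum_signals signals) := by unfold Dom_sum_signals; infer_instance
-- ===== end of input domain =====

-- B changes the decomposition: a row-major running-sum accumulator instead of A's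
-- column-major transpose-and-sum via zip; same cost, return values proved equal on Pre_.

-- ===== PORT A =====
-- zip(*ls): truncating transpose.  fuel = length of the first signal suffices, since
-- zip stops at the shortest list and min ≤ first length.
def pyZipStar (fuel : Nat) (ls : List (List Int)) : List (List Int) :=
  match fuel with
  | 0 => []
  | Nat.succ f =>
    if ls.all (fun s => !s.isEmpty) && !ls.isEmpty then
      (ls.map (fun s => s.headI)) :: pyZipStar f (ls.map (fun s => s.tail))
    else []

def sum_signals (signals : List (List Int)) : List Int :=
  match signals with
  | [] => []
  | s0 :: rest =>
    let length := s0.length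
    if rest.any (fun s => s.length != length) then []  -- ValueError: excluded by Pre_
    else (pyZipStar length (s0 :: rest)).map (fun values => values.sum)

-- ===== PORT B =====
def sum_signals_alt (signals : List (List Int)) : List Int :=
  match signals with
  | [] => []
  | s0 :: rest =>
    let length := s0.length
    if rest.any (fun s => s.length != length) then []  -- ValueError: excluded by Pre_
    else
      (s0 :: rest).foldl
        (fun total s =>
          (List.range length).foldl (fun t i => t.set i (t.getD i 0 + s.getD i 0)) total)
        (List.replicate length 0)

-- ===== PRECONDITION & SPEC =====
-- Pre_ excludes exactly the inputs where A raises ValueError (signals of unequal length);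
-- B raises the same error there.
def Pre_sum_signals (signals : List (List Int)) : Prop :=
  (signals.all (fun s => s.length == (signals.headD []).length)) = true
instance (signals : List (List Int)) : Decidable (Pre_sum_signals signals) := by
  unfold Pre_sum_signals; infer_instance

def pvWitness_sum_signals : List (List Int) := [[1, 2], [3, 4]]

def Spec_sum_signals (signals : List (List Int)) (out : List Int) : Prop := out = sum_signals_alt signals
instance (signals : List (List Int)) (out : List Int) : Decidable (Spec_sum_signals signals out) := by unfold Spec_sum_signals; infer_instance

-- ===== CLAIM (what is proved, stated in full; the proofs are below) =====
def Claim_equal_sum_signals : Prop := ∀ (signals : List (List Int)), Dom_sum_signals signals → Pre_sum_signals signals → Spec_sum_signals signals (sum_signals signals)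

-- ===== LEMMAS AND PROOFS =====

-- shifting the index loop past a fixed head cell
lemma pv_shift (s' : List Int) (b : Int) :
    ∀ (l : List Nat) (a : Int) (t : List Int),
      (l.map (· + 1)).foldl (fun t i => t.set i (t.getD i 0 + (b :: s').getD i 0)) (a :: t)
        = a :: l.foldl (fun t i => t.set i (t.getD i 0 + s'.getD i 0)) t := by
  intro l
  induction l with
  | nil => intro a t; simp
  | cons j l ih =>
      intro a t
      simp only [List.map_cons, List.foldl_cons, List.getD_cons_succ, List.set_cons_succ]
      exact ih a _

-- the inner index loop is element-wise addition
lemma pv_inner :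
    ∀ (s t : List Int), s.length = t.length →
      (List.range s.length).foldl (fun t i => t.set i (t.getD i 0 + s.getD i 0)) t
        = List.zipWith (· + ·) t s := by
  intro s
  induction s with
  | nil =>
      intro t h
      have : t = [] := List.length_eq_zero_iff.mp h.symm
      subst this; simp
  | cons b s' ih =>
      intro t h
      cases t with
      | nil => simp at h
      | cons a t' =>
        have hlen : s'.length = t'.length := by simpa using h
        simp only [List.length_cons]
        rw [List.range_succ_eq_map]
        simp only [List.foldl_cons, List.getD_cons_zero, List.set_cons_zero]
        have : (List.range s'.length).map Nat.succ = (List.range s'.length).map (· + 1) := by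
          simp
        rw [this, pv_shift, ih t' hlen]
        simp [List.zipWith]

lemma pv_map_getD_range (t : List Int) :
    (List.range t.length).map (fun i => t.getD i 0) = t := by
  apply List.ext_getElem
  · simp
  · intro i h1 h2
    simp only [List.getElem_map, List.getElem_range]
    exact List.getD_eq_getElem _ _ h2

-- B's outer accumulation computes the column sums on top of the start vector
lemma pv_outerB :
    ∀ (ls : List (List Int)) (t : List Int) (L : Nat), t.length = L → (∀ s ∈ ls, s.length = L) →
      ls.foldl
        (fun total s =>
          (List.range L).foldl (fun t i => t.set i (t.getD i 0 + s.getD i 0)) total)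
        t
      = (List.range L).map (fun i => t.getD i 0 + ((ls.map (fun s => s.getD i 0)).sum)) := by
  intro ls
  induction ls with
  | nil =>
      intro t L ht _
      subst ht
      simp only [List.foldl_nil, List.map_nil, List.sum_nil, add_zero]
      exact (pv_map_getD_range t).symm
  | cons s ls ih =>
      intro t L ht hall
      have hs : s.length = L := hall s (by simp)
      have hrest : ∀ x ∈ ls, x.length = L := fun x hx => hall x (by simp [hx])
      simp only [List.foldl_cons]
      have hst : s.length = t.length := by rw [hs, ht]
      have hinner : (List.range L).foldl (fun t i => t.set i (t.getD i 0 + s.getD i 0)) t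
          = List.zipWith (· + ·) t s := by
        rw [← hs]; exact pv_inner s t hst
      rw [hinner]
      have hzlen : (List.zipWith (· + ·) t s).length = L := by
        simp [List.length_zipWith, ht, hs]
      rw [ih _ L hzlen hrest]
      apply List.map_congr_left
      intro i hi
      have hiL : i < L := List.mem_range.mp hi
      have h1 : (List.zipWith (· + ·) t s).getD i 0 = t.getD i 0 + s.getD i 0 := by
        rw [List.getD_eq_getElem _ _ (by omega : i < (List.zipWith (· + ·) t s).length)]
        rw [List.getElem_zipWith]
        rw [List.getD_eq_getElem _ _ (by omega : i < t.length),
            List.getD_eq_getElem _ _ (by omega : i < s.length)]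
      rw [h1]
      simp [add_assoc]

-- A's transpose, on nonempty equal-length input, lists the columns
lemma pv_zipStar_spec :
    ∀ (L : Nat) (ls : List (List Int)), ls ≠ [] → (∀ s ∈ ls, s.length = L) →
      pyZipStar L ls = (List.range L).map (fun i => ls.map (fun s => s.getD i 0)) := by
  intro L
  induction L with
  | zero => intro ls _ _; simp [pyZipStar]
  | succ L ih =>
      intro ls hne hall
      have hguard : (ls.all (fun s => !s.isEmpty) && !ls.isEmpty) = true := by
        simp only [Bool.and_eq_true, List.all_eq_true]
        constructor
        · intro s hs
          have := hall s hs
          cases s with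
          | nil => simp at this
          | cons a s' => simp
        · simpa using hne
      rw [pyZipStar, if_pos hguard]
      have htne : ls.map (fun s => s.tail) ≠ [] := by
        simpa using hne
      have htall : ∀ x ∈ ls.map (fun s => s.tail), x.length = L := by
        intro x hx
        obtain ⟨s, hs, rfl⟩ := List.mem_map.mp hx
        have := hall s hs
        simp [List.length_tail, this]
      rw [ih _ htne htall]
      rw [List.range_succ_eq_map, List.map_cons, List.map_map]
      congr 1
      · apply List.map_congr_left
        intro s hs
        have := hall s hs
        cases s with
        | nil => simp at this
        | cons a s' => simp
      · apply List.map_congr_left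
        intro i _
        rw [List.map_map]
        apply List.map_congr_left
        intro s hs
        have := hall s hs
        cases s with
        | nil => simp at this
        | cons a s' => simp [Nat.succ_eq_add_one]

-- ===== VERDICT (by name: the statement is the Claim_ definition above) =====
theorem sum_signals_spec : Claim_equal_sum_signals := by
  intro signals _ hpre
  unfold Spec_sum_signals
  cases signals with
  | nil => rfl
  | cons s0 rest =>
    have hall : ∀ s ∈ s0 :: rest, s.length = s0.length := by
      intro s hs
      have := hpre
      unfold Pre_sum_signals at this
      simp only [List.all_eq_true, List.headD_cons, beq_iff_eq] at this
      exact this s hs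
    have hrest : ∀ s ∈ rest, s.length = s0.length := fun s hs => hall s (by simp [hs])
    have hany : (rest.any (fun s => s.length != s0.length)) = false := by
      simp only [List.any_eq_false, bne_iff_ne, ne_eq, not_not]
      exact hrest
    unfold sum_signals sum_signals_alt
    simp only [hany, Bool.false_eq_true, if_false]
    rw [pv_zipStar_spec s0.length (s0 :: rest) (by simp) hall]
    rw [pv_outerB (s0 :: rest) (List.replicate s0.length 0) s0.length (by simp) hall]
    rw [List.map_map]
    apply List.map_congr_left
    intro i hi
    have hiL : i < s0.length := List.mem_range.mp hi
    have h0 : (List.replicate s0.length (0 : Int)).getD i 0 = 0 := by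
      rw [List.getD_eq_getElem _ _ (by simpa using hiL)]
      simp
    rw [h0, zero_add]
    rfl
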